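-- pv_equiv track=rewrite | github.com/the-bantoo/okavango_enhancements | okavango_enhancements/app.py | get_rqd_rows
-- ===== SOURCE A (Python) =====
-- def get_rqd_rows(item_batches, row_item, qty_still_required):
--
--     rows_needed = 0
--     max_batch_qty = 0
--
--     for batch in item_batches:
--         max_batch_qty += batch['batch_qty']
--
--         if qty_still_required > batch['batch_qty']:
--             qty_still_required -= batch['batch_qty']
--             rows_needed += 1
--         else:
--             rows_needed += 1
--             break
--
--     return {
--             'rows': rows_needed,
--             'max_batch_qty': max_batch_qty
--         }
-- ===== SOURCE B (Python) =====
-- def get_rqd_rows(item_batches, row_item, qty_still_required):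
--     # Pass 1: prefix sums of batch quantities.
--     cums = []
--     total = 0
--     for batch in item_batches:
--         total += batch['batch_qty']
--         cums.append(total)
--     # Pass 2: first index whose cumulative total reaches the requirement.
--     for k, c in enumerate(cums):
--         if c >= qty_still_required:
--             return {'rows': k + 1, 'max_batch_qty': c}
--     return {'rows': len(item_batches), 'max_batch_qty': total}
-- ===== Notes on version B (the rewrite author's own statement) =====
-- stated objective: alternative
-- what changed: Replaced the single subtract-as-you-go loop with early break by two passes: build the prefix sums of batch quantities, then return at the first index whose cumulative total reaches the original requirement (falling back to the full totals).
-- outside the precondition, e.g. on get_rqd_rows([{'batch_qty': 5}, {}], '', 3): A returns {'rows': 1, 'max_batch_qty': 5}, B raises KeyError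
import Mathlib
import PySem

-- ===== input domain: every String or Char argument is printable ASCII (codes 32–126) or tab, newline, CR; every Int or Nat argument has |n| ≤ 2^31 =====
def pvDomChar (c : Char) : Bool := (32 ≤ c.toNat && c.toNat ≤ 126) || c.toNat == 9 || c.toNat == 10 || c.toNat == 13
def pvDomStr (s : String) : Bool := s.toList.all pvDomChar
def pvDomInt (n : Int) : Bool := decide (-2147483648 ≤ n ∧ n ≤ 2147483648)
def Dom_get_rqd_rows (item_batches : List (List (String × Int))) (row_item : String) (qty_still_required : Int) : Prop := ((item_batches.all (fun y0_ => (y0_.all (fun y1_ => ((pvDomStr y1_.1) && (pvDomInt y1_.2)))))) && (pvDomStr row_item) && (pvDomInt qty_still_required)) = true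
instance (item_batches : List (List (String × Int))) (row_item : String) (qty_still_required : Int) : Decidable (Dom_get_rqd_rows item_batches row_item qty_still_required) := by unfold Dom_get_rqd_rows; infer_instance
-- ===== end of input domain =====

-- B replaces A's subtract-as-you-go loop with prefix sums plus a first-hit search (objective: alternative decomposition).

-- ===== PORT A =====
-- A's for-loop with break, as structural recursion over (qty_still_required, rows_needed, max_batch_qty).
-- The `none` branch (missing 'batch_qty': Python KeyError) is excluded by Pre_get_rqd_rows.
def pvALoop : List (List (String × Int)) → Int → Int → Int → Int × Int
  | [], _, rows, maxq => (rows, maxq)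
  | b :: rest, qty, rows, maxq =>
    match (b.lookup "batch_qty") with
    | none => (rows, maxq)
    | some bq =>
      if qty > bq then pvALoop rest (qty - bq) (rows + 1) (maxq + bq)
      else (rows + 1, maxq + bq)

def get_rqd_rows (item_batches : List (List (String × Int))) (row_item : String) (qty_still_required : Int) : List (String × Int) :=
  let st := pvALoop item_batches qty_still_required 0 0
  [("rows", st.1), ("max_batch_qty", st.2)]

-- ===== PORT B =====
-- Pass 1 of Source B: fold building (total, cums).  Missing key again excluded by Pre_ (getD 0 stands in).
def pvBPass1 (item_batches : List (List (String × Int))) : Int × List Int :=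
  item_batches.foldl (fun acc b =>
    let t := acc.1 + ((b.lookup "batch_qty").getD 0)
    (t, acc.2 ++ [t])) (0, [])

-- Pass 2 of Source B: enumerate cums, return at the first cumulative total ≥ requirement.
def pvBFind : List Int → Int → Int → Option (Int × Int)
  | [], _, _ => none
  | c :: rest, qty, k => if c ≥ qty then some (k + 1, c) else pvBFind rest qty (k + 1)

def get_rqd_rows_alt (item_batches : List (List (String × Int))) (row_item : String) (qty_still_required : Int) : List (String × Int) :=
  let p := pvBPass1 item_batches
  match pvBFind p.2 qty_still_required 0 with
  | some rc => [("rows", rc.1), ("max_batch_qty", rc.2)]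
  | none => [("rows", (item_batches.length : Int)), ("max_batch_qty", p.1)]

-- ===== PRECONDITION & SPEC =====
-- Pre_ excludes batch dicts lacking the key 'batch_qty': when such a batch is reached, Python A raises KeyError
-- (it may also return when the defective batch lies after the break point; see the cite in claim.json).
def Pre_get_rqd_rows (item_batches : List (List (String × Int))) (row_item : String) (qty_still_required : Int) : Prop :=
  ∀ b ∈ item_batches, ((b.lookup "batch_qty")).isSome
instance (item_batches : List (List (String × Int))) (row_item : String) (qty_still_required : Int) : Decidable (Pre_get_rqd_rows item_batches row_item qty_still_required) := by unfold Pre_get_rqd_rows; infer_instance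

def pvWitness_get_rqd_rows : (List (List (String × Int))) × String × Int :=
  ([[("batch_qty", 4)], [("batch_qty", 3)]], "ITEM-1", 6)

def Spec_get_rqd_rows (item_batches : List (List (String × Int))) (row_item : String) (qty_still_required : Int) (out : List (String × Int)) : Prop := out = get_rqd_rows_alt item_batches row_item qty_still_required
instance (item_batches : List (List (String × Int))) (row_item : String) (qty_still_required : Int) (out : List (String × Int)) : Decidable (Spec_get_rqd_rows item_batches row_item qty_still_required out) := by unfold Spec_get_rqd_rows; infer_instance

-- ===== CLAIM (what is proved, stated in full; the proofs are below) =====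
def Claim_equal_get_rqd_rows : Prop := ∀ (item_batches : List (List (String × Int))) (row_item : String) (qty_still_required : Int), Dom_get_rqd_rows item_batches row_item qty_still_required → Pre_get_rqd_rows item_batches row_item qty_still_required → Spec_get_rqd_rows item_batches row_item qty_still_required (get_rqd_rows item_batches row_item qty_still_required)

-- ===== LEMMAS AND PROOFS =====

-- Prefix sums of batch quantities starting from a running total t.
def pvCums : List (List (String × Int)) → Int → List Int
  | [], _ => []
  | b :: rest, t =>
    let t' := t + ((b.lookup "batch_qty").getD 0)
    t' :: pvCums rest t'

def pvSum : List (List (String × Int)) → Int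
  | [] => 0
  | b :: rest => ((b.lookup "batch_qty").getD 0) + pvSum rest

theorem pvBPass1_go (batches : List (List (String × Int))) :
    ∀ (t : Int) (acc : List Int),
    batches.foldl (fun acc b =>
      let t := acc.1 + ((b.lookup "batch_qty").getD 0)
      (t, acc.2 ++ [t])) (t, acc) = (t + pvSum batches, acc ++ pvCums batches t) := by
  induction batches with
  | nil => intro t acc; simp [pvSum, pvCums]
  | cons b rest ih =>
      intro t acc
      rw [List.foldl_cons, ih]
      simp [pvSum, pvCums, add_assoc]

theorem pvBPass1_eq (batches : List (List (String × Int))) :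
    pvBPass1 batches = (pvSum batches, pvCums batches 0) := by
  have h := pvBPass1_go batches 0 []
  simpa [pvBPass1] using h

-- A's loop, on key-complete batches, equals B's search over the prefix sums (state generalized).
theorem pvALoop_eq (batches : List (List (String × Int)))
    (hk : ∀ b ∈ batches, ((b.lookup "batch_qty")).isSome) :
    ∀ (qty rows maxq : Int),
    pvALoop batches qty rows maxq =
      match pvBFind (pvCums batches maxq) (qty + maxq) rows with
      | some rc => rc
      | none => (rows + batches.length, maxq + pvSum batches) := by
  induction batches with
  | nil => intro qty rows maxq; simp [pvALoop, pvCums, pvBFind, pvSum]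
  | cons b rest ih =>
      intro qty rows maxq
      have hb : (List.lookup "batch_qty" b).isSome := hk b (by simp)
      obtain ⟨bq, hbq⟩ := Option.isSome_iff_exists.mp hb
      have hrest : ∀ b' ∈ rest, (List.lookup "batch_qty" b').isSome := by
        intro b' hb'; exact hk b' (by simp [hb'])
      simp only [pvALoop, pvCums, pvBFind, pvSum, hbq, Option.getD_some]
      by_cases h : qty > bq
      · rw [if_pos h, if_neg (by omega : ¬ maxq + bq ≥ qty + maxq)]
        have harg : qty - bq + (maxq + bq) = qty + maxq := by ring
        rw [ih hrest (qty - bq) (rows + 1) (maxq + bq), harg]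
        cases hfind : pvBFind (pvCums rest (maxq + bq)) (qty + maxq) (rows + 1) with
        | some rc => rfl
        | none =>
            simp only [Prod.mk.injEq, List.length_cons]
            refine ⟨by push_cast; ring, by ring⟩
      · rw [if_neg h, if_pos (by omega : maxq + bq ≥ qty + maxq)]

-- ===== VERDICT (by name: the statement is the Claim_ definition above) =====
theorem get_rqd_rows_spec : Claim_equal_get_rqd_rows := by
  intro item_batches row_item qty _ hpre
  unfold Spec_get_rqd_rows get_rqd_rows get_rqd_rows_alt
  simp only [pvBPass1_eq, pvALoop_eq item_batches hpre qty 0 0, add_zero]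
  cases pvBFind (pvCums item_batches 0) qty 0 <;> simp
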